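-- pv_equiv track=rewrite | github.com/mohammadfaiizan/ProjectI | DSA/Problem/Queue_Stack/06_Advanced_Queue_Applications/950_Reveal_Cards_In_Increasing_Order.py | deckRevealedIncreasing_mathematical_approach
-- ===== SOURCE A (Python) =====
-- from typing import List
-- from collections import deque
--
-- def deckRevealedIncreasing_mathematical_approach(deck: List[int]) -> List[int]:
--     """
--     Approach 6: Mathematical Approach
--
--     Use mathematical formula to determine positions.
--
--     Time: O(n log n), Space: O(n)
--     """
--     deck.sort()
--     n = len(deck)
--     result = [0] * n
--
--     # Calculate reveal positions mathematically
--     positions = []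
--     skip = False
--
--     for i in range(n):
--         if not skip:
--             positions.append(i)
--         skip = not skip
--
--     # Handle remaining positions
--     remaining = [i for i in range(n) if i not in positions]
--
--     # Simulate the process
--     queue = deque(range(n))
--     reveal_order = []
--
--     while queue:
--         reveal_order.append(queue.popleft())
--         if queue:
--             queue.append(queue.popleft())
--
--     # Map cards to positions
--     for i, card in enumerate(deck):
--         result[reveal_order[i]] = card
--
--     return result
-- ===== SOURCE B (Python) =====
-- from typing import List
-- from collections import deque
--
-- def deckRevealedIncreasing_mathematical_approach(deck: List[int]) -> List[int]:
--     deck.sort()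
--     d = deque()
--     for card in reversed(deck):
--         if d:
--             d.appendleft(d.pop())
--         d.appendleft(card)
--     return list(d)
-- ===== Notes on version B (the rewrite author's own statement) =====
-- stated objective: faster
-- what changed: Replaces the forward index-queue simulation plus scatter-into-a-result-array (and A's dead quadratic positions/remaining computation) with a direct reverse simulation: iterate the sorted cards from largest to smallest over a deque, rotating the back to the front before each appendleft.
import Mathlib
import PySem

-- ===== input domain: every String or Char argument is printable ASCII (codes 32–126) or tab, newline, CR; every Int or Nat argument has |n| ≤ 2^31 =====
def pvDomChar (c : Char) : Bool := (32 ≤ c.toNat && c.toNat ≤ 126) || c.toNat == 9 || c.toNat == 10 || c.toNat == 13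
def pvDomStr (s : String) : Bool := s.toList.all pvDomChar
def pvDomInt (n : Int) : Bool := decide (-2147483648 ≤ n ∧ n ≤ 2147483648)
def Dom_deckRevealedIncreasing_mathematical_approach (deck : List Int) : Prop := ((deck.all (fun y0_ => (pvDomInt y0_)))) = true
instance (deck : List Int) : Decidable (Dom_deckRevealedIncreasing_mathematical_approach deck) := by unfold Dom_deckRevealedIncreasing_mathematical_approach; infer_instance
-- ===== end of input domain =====

-- B replaces A's forward index-queue simulation + scatter with a direct reverse deque simulation
-- over the sorted cards, largest first. Both Pythons sort `deck` in place; the equivalence proved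
-- here is about the RETURN value.

-- ===== PORT A =====
-- A's `while queue:` loop: pop the front into the reveal order; if nonempty, move the next front to the back.
def pvRevealLoop (queue : List Int) (acc : List Int) : List Int :=
  match queue with
  | [] => acc
  | x :: rest =>
    match rest with
    | [] => acc ++ [x]
    | y :: rest2 => pvRevealLoop (rest2 ++ [y]) (acc ++ [x])
termination_by queue.length
decreasing_by simp

def deckRevealedIncreasing_mathematical_approach (deck : List Int) : List Int :=
  let deck := PySem.List.sorted deck (fun x => x) false
  let n : Int := deck.length
  let result : List Int := List.replicate deck.length (0 : Int)
  -- positions/skip loop (A computes these but never uses them)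
  let ps := (PySem.List.pyRange 0 n 1).foldl
    (fun (st : List Int × Bool) i => ((if !st.2 then st.1 ++ [i] else st.1), !st.2)) ([], false)
  let positions := ps.1
  let _remaining := (PySem.List.pyRange 0 n 1).filter (fun i => !(positions.contains i))
  let reveal_order := pvRevealLoop (PySem.List.pyRange 0 n 1) []
  -- for i, card in enumerate(deck): result[reveal_order[i]] = card
  (PySem.List.enumerate deck).foldl
    (fun res (p : Int × Int) =>
      PySem.List.pySetD res (PySem.List.pyGetD reveal_order p.1 0) p.2) result

-- ===== PORT B =====
def deckRevealedIncreasing_mathematical_approach_alt (deck : List Int) : List Int :=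
  let s := PySem.List.sorted deck (fun x => x) false
  -- for card in reversed(s): if d: d.appendleft(d.pop()); d.appendleft(card)
  s.reverse.foldl
    (fun d card =>
      let d' := match d.getLast? with
        | none => d
        | some x => x :: d.dropLast
      card :: d') []

-- ===== PRECONDITION & SPEC =====
def Spec_deckRevealedIncreasing_mathematical_approach (deck : List Int) (out : List Int) : Prop := out = deckRevealedIncreasing_mathematical_approach_alt deck
instance (deck : List Int) (out : List Int) : Decidable (Spec_deckRevealedIncreasing_mathematical_approach deck out) := by unfold Spec_deckRevealedIncreasing_mathematical_approach; infer_instance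

-- ===== CLAIM (what is proved, stated in full; the proofs are below) =====
def Claim_equal_deckRevealedIncreasing_mathematical_approach : Prop := ∀ (deck : List Int), Dom_deckRevealedIncreasing_mathematical_approach deck → Spec_deckRevealedIncreasing_mathematical_approach deck (deckRevealedIncreasing_mathematical_approach deck)

-- ===== LEMMAS AND PROOFS =====

-- The "reveal" permutation: take the front, then rotate the next card to the back.
def pvRotate {α : Type} (l : List α) : List α :=
  match l with
  | [] => []
  | y :: t => t ++ [y]

theorem pvRotate_length {α : Type} (l : List α) : (pvRotate l).length = l.length := by
  cases l <;> simp [pvRotate]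

def pvReveal {α : Type} (l : List α) : List α :=
  match l with
  | [] => []
  | x :: q => x :: pvReveal (pvRotate q)
termination_by l.length
decreasing_by simp [pvRotate_length]

theorem pvReveal_length {α : Type} (l : List α) : (pvReveal l).length = l.length := by
  induction l using pvReveal.induct with
  | case1 => simp [pvReveal]
  | case2 x q ih => simp [pvReveal, ih, pvRotate_length]

theorem pvReveal_perm {α : Type} (l : List α) : (pvReveal l).Perm l := by
  induction l using pvReveal.induct with
  | case1 => simp [pvReveal]
  | case2 x q ih =>
    have h : (pvRotate q).Perm q := by
      cases q with
      | nil => simp [pvRotate]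
      | cons y t => simp [pvRotate]
    simp [pvReveal]
    exact ih.trans h

theorem pvRotate_map {α β : Type} (f : α → β) (l : List α) :
    pvRotate (l.map f) = (pvRotate l).map f := by
  cases l <;> simp [pvRotate]

theorem pvReveal_map {α β : Type} (f : α → β) (l : List α) :
    pvReveal (l.map f) = (pvReveal l).map f := by
  induction l using pvReveal.induct with
  | case1 => simp [pvReveal]
  | case2 x q ih => simp [pvReveal, pvRotate_map, ih]

theorem pvRotate_inj {α : Type} (q q' : List α) (hlen : q.length = q'.length)
    (h : pvRotate q = pvRotate q') : q = q' := by
  cases q with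
  | nil => cases q' with
    | nil => rfl
    | cons y t => simp at hlen
  | cons y t => cases q' with
    | nil => simp at hlen
    | cons y' t' =>
      simp [pvRotate] at h
      simp_all

theorem pvReveal_inj_aux {α : Type} :
    ∀ (n : Nat) (l l' : List α), l.length ≤ n → pvReveal l = pvReveal l' → l = l' := by
  intro n
  induction n with
  | zero =>
    intro l l' hlen h
    have h0 : l = [] := List.length_eq_zero_iff.mp (Nat.le_zero.mp hlen)
    subst h0
    cases l' with
    | nil => rfl
    | cons x q => simp [pvReveal] at h
  | succ n ih =>
    intro l l' hlen h
    cases l with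
    | nil =>
      cases l' with
      | nil => rfl
      | cons x q => simp [pvReveal] at h
    | cons x q =>
      cases l' with
      | nil => simp [pvReveal] at h
      | cons x' q' =>
        simp [pvReveal] at h
        obtain ⟨hx, hq⟩ := h
        have hql : (pvRotate q).length ≤ n := by
          have h1 := pvRotate_length q
          have h2 : (x :: q).length = q.length + 1 := List.length_cons ..
          omega
        have hr := ih (pvRotate q) (pvRotate q') hql hq
        have hlq : q.length = q'.length := by
          have h3 := congrArg List.length hr
          rw [pvRotate_length, pvRotate_length] at h3
          exact h3
        rw [hx, pvRotate_inj q q' hlq hr]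

theorem pvReveal_inj {α : Type} (l l' : List α) (h : pvReveal l = pvReveal l') : l = l' :=
  pvReveal_inj_aux l.length l l' le_rfl h

theorem pvRevealLoop_eq (q acc : List Int) : pvRevealLoop q acc = acc ++ pvReveal q := by
  induction q, acc using pvRevealLoop.induct with
  | case1 acc => simp [pvRevealLoop, pvReveal]
  | case2 acc x => simp [pvRevealLoop, pvReveal, pvRotate]
  | case3 acc x y rest2 ih =>
    rw [pvRevealLoop, ih]
    simp [pvReveal, pvRotate]

-- B's loop step un-rotates, so pvReveal of the accumulated deque unwinds one card per step.
theorem pvReveal_stepB (d : List Int) (card : Int) :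
    pvReveal (card :: (match d.getLast? with
      | none => d
      | some x => x :: d.dropLast)) = card :: pvReveal d := by
  induction d using List.reverseRecOn with
  | nil => simp [pvReveal, pvRotate]
  | append_singleton t x _ =>
    rw [pvReveal]
    simp [pvRotate]

theorem pvReveal_foldB (cs : List Int) : ∀ (d : List Int),
    pvReveal (cs.foldl (fun d card =>
      let d' := match d.getLast? with
        | none => d
        | some x => x :: d.dropLast
      card :: d') d) = cs.reverse ++ pvReveal d := by
  induction cs with
  | nil => simp
  | cons c cs ih =>
    intro d
    simp only [List.foldl_cons, List.reverse_cons, List.append_assoc]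
    rw [ih, pvReveal_stepB]
    simp

-- scatter fold (Nat indices)
theorem setFold_length (ps : List (Nat × Int)) (res : List Int) :
    (ps.foldl (fun r p => r.set p.1 p.2) res).length = res.length := by
  induction ps generalizing res with
  | nil => rfl
  | cons p ps ih => simp [ih]

theorem setFold_getD_not_mem (ps : List (Nat × Int)) (res : List Int) (j : Nat)
    (h : ∀ p ∈ ps, p.1 ≠ j) :
    (ps.foldl (fun r p => r.set p.1 p.2) res).getD j 0 = res.getD j 0 := by
  induction ps generalizing res with
  | nil => rfl
  | cons p ps ih =>
    simp only [List.foldl_cons]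
    rw [ih _ (fun q hq => h q (List.mem_cons_of_mem p hq))]
    have hne : p.1 ≠ j := h p (List.mem_cons_self)
    simp [List.getD, List.getElem?_set_ne hne]

theorem setFold_getD (ps : List (Nat × Int)) (res : List Int) (j : Nat) (v : Int)
    (hpw : ps.Pairwise (fun a b => a.1 ≠ b.1)) (hmem : (j, v) ∈ ps) (hj : j < res.length) :
    (ps.foldl (fun r p => r.set p.1 p.2) res).getD j 0 = v := by
  induction ps generalizing res with
  | nil => simp at hmem
  | cons p ps ih =>
    rcases List.mem_cons.mp hmem with h | h
    · subst h
      simp only [List.foldl_cons]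
      rw [setFold_getD_not_mem _ _ _ (fun q hq => ((List.pairwise_cons.mp hpw).1 q hq).symm)]
      simp [List.getD, hj]
    · exact ih _ (List.pairwise_cons.mp hpw).2 h (by simpa using hj)

-- A's enumerate-scatter fold, rewritten as a fold over zip with the reveal order.
theorem enumFold (ro s : List Int) : ∀ (a : Int) (res : List Int), 0 ≤ a → a.toNat + s.length ≤ ro.length →
    (PySem.List.enumerate s a).foldl
      (fun r (p : Int × Int) => PySem.List.pySetD r (PySem.List.pyGetD ro p.1 0) p.2) res
    = ((ro.drop a.toNat).zip s).foldl (fun r (p : Int × Int) => PySem.List.pySetD r p.1 p.2) res := by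
  induction s with
  | nil => simp [PySem.List.enumerate_nil]
  | cons x s ih =>
    intro a res ha hlen
    have halt : a.toNat < ro.length := by simp at hlen; omega
    rw [PySem.List.enumerate_cons]
    simp only [List.foldl_cons]
    rw [ih (a + 1) _ (by omega) (by simp at hlen ⊢; omega)]
    have htn : (a + 1).toNat = a.toNat + 1 := by omega
    rw [htn, List.drop_eq_getElem_cons halt]
    simp only [List.zip_cons_cons, List.foldl_cons]
    rw [PySem.List.pyGetD_of_nonneg ro 0 ha, List.getD_eq_getElem ro 0 halt]

-- main structural lemma: A's result, as a zip-scatter over Nat indices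
theorem portA_eq_setFold (deck : List Int) :
    deckRevealedIncreasing_mathematical_approach deck
    = ((pvReveal (List.range (PySem.List.sorted deck (fun x => x) false).length)).zip
        (PySem.List.sorted deck (fun x => x) false)).foldl
        (fun r p => r.set p.1 p.2)
        (List.replicate (PySem.List.sorted deck (fun x => x) false).length 0) := by
  unfold deckRevealedIncreasing_mathematical_approach
  dsimp only
  set s := PySem.List.sorted deck (fun x => x) false with hs
  rw [pvRevealLoop_eq, List.nil_append, PySem.List.pyRange_zero_natCast, pvReveal_map]
  rw [enumFold _ s 0 _ (by omega) (by simp [pvReveal_length])]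
  rw [Int.toNat_zero, List.drop_zero, List.zip_map_left, List.foldl_map]
  simp [Prod.map]

theorem portB_reveal (deck : List Int) :
    pvReveal (deckRevealedIncreasing_mathematical_approach_alt deck)
    = PySem.List.sorted deck (fun x => x) false := by
  unfold deckRevealedIncreasing_mathematical_approach_alt
  rw [pvReveal_foldB]
  simp [pvReveal]

theorem portA_reveal (deck : List Int) :
    pvReveal (deckRevealedIncreasing_mathematical_approach deck)
    = PySem.List.sorted deck (fun x => x) false := by
  rw [portA_eq_setFold]
  set s := PySem.List.sorted deck (fun x => x) false with hs
  set rev0 := pvReveal (List.range s.length) with hrev0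
  set F := (rev0.zip s).foldl (fun r p => r.set p.1 p.2) (List.replicate s.length 0) with hF
  have hperm : rev0.Perm (List.range s.length) := pvReveal_perm _
  have hnodup : rev0.Nodup := (hperm.nodup_iff).mpr (List.nodup_range)
  have hlen0 : rev0.length = s.length := by rw [hrev0, pvReveal_length, List.length_range]
  have hFlen : F.length = s.length := by rw [hF, setFold_length, List.length_replicate]
  have hFid : F = (List.range s.length).map (fun j => F.getD j 0) := by
    apply List.ext_getElem (by simp [hFlen])
    intro i h1 h2
    simp only [List.getElem_map, List.getElem_range]
    rw [List.getD_eq_getElem F 0 (by omega)]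
  have hmf : (rev0.zip s).map Prod.fst = rev0 :=
    List.map_fst_zip (le_of_eq hlen0)
  have hpw : (rev0.zip s).Pairwise (fun a b => a.1 ≠ b.1) := by
    have h := hnodup
    rw [← hmf] at h
    exact (List.pairwise_map).mp h
  calc pvReveal F = pvReveal ((List.range s.length).map (fun j => F.getD j 0)) := by
        conv_lhs => rw [hFid]
    _ = rev0.map (fun j => F.getD j 0) := by rw [pvReveal_map]
    _ = s := by
        apply List.ext_getElem (by simp [hlen0])
        intro k h1 h2
        simp only [List.getElem_map]
        have hk0 : k < rev0.length := by simpa [hlen0] using h2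
        have hjmem : rev0[k] ∈ List.range s.length := hperm.mem_iff.mp (List.getElem_mem hk0)
        have hjlt : rev0[k] < s.length := List.mem_range.mp hjmem
        have hkz : k < (rev0.zip s).length := by
          rw [List.length_zip, hlen0, Nat.min_self]; exact h2
        have hzmem : (rev0[k], s[k]) ∈ rev0.zip s := by
          have hm := List.getElem_mem hkz
          rw [List.getElem_zip] at hm
          exact hm
        show (List.foldl (fun r p => r.set p.1 p.2) (List.replicate s.length 0) (rev0.zip s)).getD rev0[k] 0 = s[k]
        exact setFold_getD _ _ _ _ hpw hzmem (by simpa using hjlt)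

-- ===== VERDICT (by name: the statement is the Claim_ definition above) =====
theorem deckRevealedIncreasing_mathematical_approach_spec : Claim_equal_deckRevealedIncreasing_mathematical_approach := by
  intro deck _
  unfold Spec_deckRevealedIncreasing_mathematical_approach
  exact pvReveal_inj _ _ ((portA_reveal deck).trans (portB_reveal deck).symm)
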